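-- pv_equiv track=rewrite | github.com/briehl/advent-of-code | 2018/day2/checksummer.py | has_exact_letters
-- ===== SOURCE A (Python) =====
-- from collections import defaultdict
--
-- def has_exact_letters(box: str, count:int=2) -> bool:
--     """
--     Returns True if the box str has at least one letter
--     with exactly count number of repetitions.
--     E.g.
--     abbaaa, count=2 returns True (2 b)
--     abcdef, count=2 returns False
--     """
--     letters = defaultdict(int)
--     for letter in box:
--         letters[letter] += 1
--     for k,v in letters.items():
--         if v == count:
--             return True
--     return False
-- ===== SOURCE B (Python) =====
-- def has_exact_letters(box: str, count: int = 2) -> bool: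
--     """True iff some letter occurs exactly `count` times in box.
--
--     Sort the characters so equal letters become contiguous, then scan the
--     runs; a run's length is that letter's total count.
--     """
--     s = sorted(box)
--     i, n = 0, len(s)
--     while i < n:
--         j = i + 1
--         while j < n and s[j] == s[i]:
--             j += 1
--         if j - i == count:
--             return True
--         i = j
--     return False
-- ===== Notes on version B (the rewrite author's own statement) =====
-- stated objective: alternative
-- what changed: Replaces the frequency-dict build plus items scan with sort-then-run-length: sort the characters so equal letters are contiguous, then scan maximal runs and test each run's length against count.
import Mathlib
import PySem

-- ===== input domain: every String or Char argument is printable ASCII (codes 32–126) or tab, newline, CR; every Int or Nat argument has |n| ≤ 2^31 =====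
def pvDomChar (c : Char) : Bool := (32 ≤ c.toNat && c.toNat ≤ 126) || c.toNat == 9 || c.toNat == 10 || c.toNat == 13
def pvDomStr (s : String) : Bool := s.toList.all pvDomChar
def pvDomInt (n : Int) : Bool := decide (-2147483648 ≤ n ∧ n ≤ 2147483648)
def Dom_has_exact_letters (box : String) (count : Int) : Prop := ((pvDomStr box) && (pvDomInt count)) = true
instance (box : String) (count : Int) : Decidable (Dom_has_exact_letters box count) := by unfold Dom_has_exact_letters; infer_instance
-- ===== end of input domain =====

-- B replaces A's frequency-dict build + items scan with sort-then-run-length scan (alternative algorithm, same result).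

-- ===== PORT A =====
-- A: letters = defaultdict(int); for letter in box: letters[letter] += 1; then scan items for v == count
def has_exact_letters (box : String) (count : Int) : Bool :=
  let letters : PySem.Dict Char Int :=
    box.toList.foldl (fun d letter => d.modify letter 0 (· + 1)) PySem.Dict.empty
  letters.items.any (fun kv => kv.2 == count)

-- ===== PORT B =====
-- B: s = sorted(box); scan maximal runs (inner while = takeWhile/dropWhile on the rest) and
-- return True iff some run's length equals count.
def runScan (count : Int) : List Char → Bool
  | [] => false
  | c :: rest =>
    if ((1 + (rest.takeWhile (fun x => x == c)).length : Int) == count) then true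
    else runScan count (rest.dropWhile (fun x => x == c))
termination_by l => l.length
decreasing_by
  simpa using Nat.lt_succ_of_le (List.length_dropWhile_le _ _)

def has_exact_letters_alt (box : String) (count : Int) : Bool :=
  runScan count (PySem.List.sorted box.toList (fun x => x) false)

-- ===== PRECONDITION & SPEC =====
def Spec_has_exact_letters (box : String) (count : Int) (out : Bool) : Prop := out = has_exact_letters_alt box count
instance (box : String) (count : Int) (out : Bool) : Decidable (Spec_has_exact_letters box count out) := by unfold Spec_has_exact_letters; infer_instance

-- ===== CLAIM (what is proved, stated in full; the proofs are below) =====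
def Claim_equal_has_exact_letters : Prop := ∀ (box : String) (count : Int), Dom_has_exact_letters box count → Spec_has_exact_letters box count (has_exact_letters box count)

-- ===== LEMMAS AND PROOFS =====

-- ===== VERDICT (by name: the statement is the Claim_ definition above) =====
-- the first element surviving dropWhile fails the predicate
theorem head_dropWhile_false {α : Type} (p : α → Bool) :
    ∀ (l : List α) (d : α) (t : List α), l.dropWhile p = d :: t → p d = false := by
  intro l
  induction l with
  | nil => intro d t h; simp [List.dropWhile] at h
  | cons a as ih =>
    intro d t h
    rw [List.dropWhile_cons] at h
    by_cases hp : p a = true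
    · rw [if_pos hp] at h; exact ih d t h
    · rw [if_neg hp] at h
      cases h
      simpa using hp

-- In a ≤-sorted list c :: rest, no c survives dropWhile (· == c).
theorem not_mem_dropWhile_sorted (c : Char) (rest : List Char)
    (hl : (c :: rest).Pairwise (· ≤ ·)) :
    c ∉ rest.dropWhile (fun x => x == c) := by
  intro hmem
  rcases List.pairwise_cons.mp hl with ⟨hle, hrest⟩
  cases hD : rest.dropWhile (fun x => x == c) with
  | nil => simp [hD] at hmem
  | cons d t =>
    have hdne' : d ≠ c := by
      have := head_dropWhile_false (fun x => x == c) rest d t hD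
      simpa using this
    have hdmem : d ∈ rest := (List.dropWhile_sublist _).subset (by rw [hD]; exact List.mem_cons_self)
    have hcd : c ≤ d := hle d hdmem
    have hDp : (rest.dropWhile (fun x => x == c)).Pairwise (· ≤ ·) :=
      hrest.sublist (List.dropWhile_sublist _)
    rw [hD] at hDp hmem
    rcases List.mem_cons.mp hmem with h | h
    · exact hdne' h.symm
    · have hdc : d ≤ c := (List.pairwise_cons.mp hDp).1 c h
      exact hdne' (le_antisymm hdc hcd)

theorem runScan_iff (count : Int) :
    ∀ (n : Nat) (l : List Char), l.length ≤ n → l.Pairwise (· ≤ ·) →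
    (runScan count l = true ↔ ∃ c ∈ l, (l.count c : Int) = count) := by
  intro n
  induction n with
  | zero =>
    intro l hlen _
    have : l = [] := List.eq_nil_of_length_eq_zero (Nat.le_zero.mp hlen)
    subst this; simp [runScan]
  | succ n ih =>
    intro l hlen hl
    cases l with
    | nil => simp [runScan]
    | cons c rest =>
      have hcnz : c ∉ rest.dropWhile (fun x => x == c) :=
        not_mem_dropWhile_sorted c rest hl
      have hsplit : rest.takeWhile (fun x => x == c) ++ rest.dropWhile (fun x => x == c) = rest :=
        List.takeWhile_append_dropWhile
      have htake : ∀ x ∈ rest.takeWhile (fun x => x == c), x = c := by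
        intro x hx
        have := List.mem_takeWhile_imp hx
        simpa using this
      have hcount_c : ((c :: rest).count c : Int)
          = 1 + ((rest.takeWhile (fun x => x == c)).length : Int) := by
        have h1 : rest.count c = (rest.takeWhile (fun x => x == c)).length := by
          conv_lhs => rw [← hsplit]
          rw [List.count_append]
          have h2 : (rest.takeWhile (fun x => x == c)).count c
              = (rest.takeWhile (fun x => x == c)).length :=
            List.count_eq_length.mpr (fun b hb => ((htake b hb).symm : c = b))
          have h3 : (rest.dropWhile (fun x => x == c)).count c = 0 :=
            List.count_eq_zero.mpr hcnz
          omega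
        rw [List.count_cons_self, h1]
        push_cast
        ring
      have hDlen : (rest.dropWhile (fun x => x == c)).length ≤ n := by
        have := List.length_dropWhile_le (fun x => x == c) rest
        simp at hlen
        omega
      have hDp : (rest.dropWhile (fun x => x == c)).Pairwise (· ≤ ·) :=
        (List.pairwise_cons.mp hl).2.sublist (List.dropWhile_sublist _)
      have hIH := ih (rest.dropWhile (fun x => x == c)) hDlen hDp
      rw [runScan]
      by_cases hif : ((1 + ((rest.takeWhile (fun x => x == c)).length : Int)) == count) = true
      · simp only [hif, if_true]
        constructor
        · intro _
          exact ⟨c, List.mem_cons_self, by rw [hcount_c]; exact (by simpa using hif)⟩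
        · intro _; trivial
      · have hne : (1 + ((rest.takeWhile (fun x => x == c)).length : Int)) ≠ count := by
          simpa using hif
        simp only [hif]
        rw [if_neg Bool.false_ne_true, hIH]
        constructor
        · rintro ⟨d, hd, hdc⟩
          refine ⟨d, ?_, ?_⟩
          · exact List.mem_cons_of_mem _ (by rw [← hsplit]; exact List.mem_append_right _ hd)
          · -- l.count d = D.count d  since d ≠ c and d ∉ takeWhile
            have hdnec : d ≠ c := fun h => hcnz (h ▸ hd)
            have : (c :: rest).count d = (rest.dropWhile (fun x => x == c)).count d := by
              rw [List.count_cons_of_ne hdnec.symm]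
              conv_lhs => rw [← hsplit]
              rw [List.count_append]
              have : (rest.takeWhile (fun x => x == c)).count d = 0 :=
                List.count_eq_zero.mpr (fun hmem => hdnec (htake d hmem))
              omega
            rw [this]; exact hdc
        · rintro ⟨d, hd, hdc⟩
          have hdnec : d ≠ c := by
            intro h; subst h
            rw [hcount_c] at hdc
            exact hne hdc
          have hdrest : d ∈ rest := by
            rcases List.mem_cons.mp hd with h | h
            · exact absurd h hdnec
            · exact h
          have hdD : d ∈ rest.dropWhile (fun x => x == c) := by
            rw [← hsplit] at hdrest
            rcases List.mem_append.mp hdrest with h | h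
            · exact absurd (htake d h) hdnec
            · exact h
          refine ⟨d, hdD, ?_⟩
          have : (c :: rest).count d = (rest.dropWhile (fun x => x == c)).count d := by
            rw [List.count_cons_of_ne hdnec.symm]
            conv_lhs => rw [← hsplit]
            rw [List.count_append]
            have : (rest.takeWhile (fun x => x == c)).count d = 0 :=
              List.count_eq_zero.mpr (fun hmem => hdnec (htake d hmem))
            omega
          rw [← this]; exact hdc

-- A's side: the dict-items scan is true iff some distinct letter has count = count.
theorem hasA_iff (box : String) (count : Int) :
    has_exact_letters box count = true ↔ ∃ c ∈ box.toList, (box.toList.count c : Int) = count := by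
  show ((PySem.Dict.counter box.toList).items.any (fun kv => kv.2 == count)) = true ↔ _
  rw [PySem.Dict.items_counter]
  simp only [List.any_map, List.any_eq_true, Function.comp]
  constructor
  · rintro ⟨c, hc, h⟩
    exact ⟨c, (PySem.Set.mem_ofList _ _).mp hc, by simpa using h⟩
  · rintro ⟨c, hc, h⟩
    exact ⟨c, (PySem.Set.mem_ofList _ _).mpr hc, by simpa using h⟩

theorem has_exact_letters_spec : Claim_equal_has_exact_letters := by
  intro box count _
  show has_exact_letters box count = has_exact_letters_alt box count
  have hsort := PySem.List.sorted_perm (xs := box.toList) (key := fun x => x) (rev := false)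
  have hB := runScan_iff count (PySem.List.sorted box.toList (fun x => x) false).length
    (PySem.List.sorted box.toList (fun x => x) false) le_rfl
    (by simpa using PySem.List.sorted_pairwise (xs := box.toList) (key := fun x => x))
  have hBiff : has_exact_letters_alt box count = true ↔ ∃ c ∈ box.toList, (box.toList.count c : Int) = count := by
    unfold has_exact_letters_alt
    rw [hB]
    constructor
    · rintro ⟨c, hc, h⟩
      exact ⟨c, hsort.mem_iff.mp hc, by rw [← hsort.count_eq]; exact h⟩
    · rintro ⟨c, hc, h⟩
      exact ⟨c, hsort.mem_iff.mpr hc, by rw [hsort.count_eq]; exact h⟩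
  have := (hasA_iff box count).trans hBiff.symm
  cases hA : has_exact_letters box count <;> cases hB2 : has_exact_letters_alt box count <;> simp_all
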